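-- pv_equiv track=rewrite | github.com/robertacoeli/brazilian-impeachment-polarization-calculation | src/labeling/FindingUsersHashtags.py | check_central_term
-- ===== SOURCE A (Python) =====
-- def check_central_term(tt_tokens, terms):
--     if len(tt_tokens) <= 0:
--         return False
--
--     for checked_tweet_word in tt_tokens:
--         for tm in terms:
--             if tm in checked_tweet_word:
--                 return True
--     return False
-- ===== SOURCE B (Python) =====
-- def check_central_term(tt_tokens, terms):
--     # Join all tokens into one text with a NUL separator (NUL never occurs in the
--     # token/term alphabet), then test each term once against the whole text.
--     if not tt_tokens:
--         return False
--     blob = "\x00".join(tt_tokens)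
--     return any(tm in blob for tm in terms)
-- ===== Notes on version B (the rewrite author's own statement) =====
-- stated objective: alternative
-- what changed: Instead of testing every term against every token in nested loops, B joins all tokens once into a single NUL-separated text and performs one substring test per term on that text; the separator cannot occur in the (printable-ASCII) alphabet, so a term matches the blob iff it matches some token.
import Mathlib
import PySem

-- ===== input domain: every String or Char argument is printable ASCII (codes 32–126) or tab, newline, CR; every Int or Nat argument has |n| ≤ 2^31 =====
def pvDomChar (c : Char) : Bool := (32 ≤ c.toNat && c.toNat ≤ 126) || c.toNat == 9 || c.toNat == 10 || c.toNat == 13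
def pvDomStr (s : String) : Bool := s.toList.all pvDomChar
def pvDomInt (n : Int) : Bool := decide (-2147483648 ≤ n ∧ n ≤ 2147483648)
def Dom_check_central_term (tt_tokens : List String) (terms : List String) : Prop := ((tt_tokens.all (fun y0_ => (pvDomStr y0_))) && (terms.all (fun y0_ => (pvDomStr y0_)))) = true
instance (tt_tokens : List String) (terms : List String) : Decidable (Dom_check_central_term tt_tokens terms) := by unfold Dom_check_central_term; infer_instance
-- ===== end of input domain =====

-- B joins all tokens once into a single NUL-separated text and runs one substring
-- test per term over it, replacing A's nested token×term scan (alternative structure;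
-- NUL does not occur in the domain's alphabet, so matches cannot cross token borders).

-- ===== PORT A =====
-- inner loop: 'for tm in terms: if tm in checked_tweet_word: return True'
def ccTermLoop (w : String) (terms : List String) : Bool :=
  match terms with
  | [] => false
  | tm :: rest => if PySem.Str.isIn tm w then true else ccTermLoop w rest

-- outer loop: 'for checked_tweet_word in tt_tokens: …'
def ccTokenLoop (tt_tokens : List String) (terms : List String) : Bool :=
  match tt_tokens with
  | [] => false
  | w :: rest => if ccTermLoop w terms then true else ccTokenLoop rest terms

def check_central_term (tt_tokens : List String) (terms : List String) : Bool :=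
  if tt_tokens.length ≤ 0 then false
  else ccTokenLoop tt_tokens terms

-- ===== PORT B =====
def check_central_term_alt (tt_tokens : List String) (terms : List String) : Bool :=
  if tt_tokens = [] then false
  else
    let blob := PySem.Str.join "\x00" tt_tokens
    terms.any (fun tm => PySem.Str.isIn tm blob)

-- ===== PRECONDITION & SPEC =====
def Spec_check_central_term (tt_tokens : List String) (terms : List String) (out : Bool) : Prop := out = check_central_term_alt tt_tokens terms
instance (tt_tokens : List String) (terms : List String) (out : Bool) : Decidable (Spec_check_central_term tt_tokens terms out) := by unfold Spec_check_central_term; infer_instance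

-- ===== CLAIM (what is proved, stated in full; the proofs are below) =====
def Claim_equal_check_central_term : Prop := ∀ (tt_tokens : List String) (terms : List String), Dom_check_central_term tt_tokens terms → Spec_check_central_term tt_tokens terms (check_central_term tt_tokens terms)

-- ===== LEMMAS AND PROOFS =====

theorem ccTermLoop_eq_any (w : String) (terms : List String) :
    ccTermLoop w terms = terms.any (fun tm => PySem.Str.isIn tm w) := by
  induction terms with
  | nil => rfl
  | cons tm rest ih =>
    simp only [ccTermLoop, ih, List.any_cons]
    cases PySem.Str.isIn tm w <;> simp

theorem ccTokenLoop_eq (tt_tokens terms : List String) :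
    ccTokenLoop tt_tokens terms = tt_tokens.any (fun w => terms.any (fun tm => PySem.Str.isIn tm w)) := by
  induction tt_tokens with
  | nil => rfl
  | cons w rest ih =>
    simp only [ccTokenLoop, ih, ccTermLoop_eq_any, List.any_cons]
    cases (terms.any fun tm => PySem.Str.isIn tm w) <;> simp

-- a list avoiding c that is a prefix of a ++ c :: b is a prefix of a
theorem prefix_through {α : Type} (c : α) (l : List α) (hc : c ∉ l) :
    ∀ (a b : List α), l <+: a ++ c :: b → l <+: a := by
  induction l with
  | nil => intro a b _; exact List.nil_prefix
  | cons y l' ih =>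
    intro a b h
    cases a with
    | nil =>
      exfalso
      rcases h with ⟨t, ht⟩
      simp only [List.nil_append, List.cons_append] at ht
      have : y = c := by injection ht
      exact hc (by simp [this])
    | cons x a' =>
      rcases h with ⟨t, ht⟩
      simp only [List.cons_append, List.cons.injEq] at ht
      obtain ⟨hyx, htl⟩ := ht
      have : l' <+: a' := ih (fun hm => hc (List.mem_cons_of_mem _ hm)) a' b ⟨t, by simpa using htl⟩
      exact List.cons_prefix_cons.mpr ⟨hyx, this⟩

-- an infix avoiding c of a ++ c :: b lies inside a or inside b
theorem infix_split {α : Type} (c : α) (l : List α) (hc : c ∉ l) :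
    ∀ (a b : List α), l <:+: a ++ c :: b → l <:+: a ∨ l <:+: b := by
  intro a
  induction a with
  | nil =>
    intro b h
    simp only [List.nil_append] at h
    rcases List.infix_cons_iff.mp h with hp | hi
    · cases l with
      | nil => exact Or.inl (List.infix_refl _)
      | cons y l' =>
        exfalso
        rcases hp with ⟨t, ht⟩
        have : y = c := by
          rw [List.cons_append, List.cons.injEq] at ht
          exact ht.1
        exact hc (by simp [this])
    · exact Or.inr hi
  | cons x a' ih =>
    intro b h
    simp only [List.cons_append] at h
    rcases List.infix_cons_iff.mp h with hp | hi
    · exact Or.inl ((prefix_through c l hc (x :: a') b (by simpa using hp)).isInfix)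
    · rcases ih b hi with h1 | h2
      · exact Or.inl (List.infix_cons h1)
      · exact Or.inr h2

-- substring of the c-joined nonempty list ↔ substring of one of the pieces
theorem infix_join (c : Char) (l : List Char) (hc : c ∉ l) :
    ∀ (p : List Char) (rest : List (List Char)),
      (l <:+: PySem.Chars.join [c] (p :: rest) ↔ l <:+: p ∨ ∃ q ∈ rest, l <:+: q) := by
  intro p rest
  induction rest generalizing p with
  | nil => simp [PySem.Chars.join, List.intercalate]
  | cons q rest' ih =>
    rw [PySem.Chars.join_cons_cons]
    have hshape : p ++ [c] ++ PySem.Chars.join [c] (q :: rest')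
        = p ++ c :: PySem.Chars.join [c] (q :: rest') := by simp
    rw [hshape]
    constructor
    · intro h
      rcases infix_split c l hc p _ h with h1 | h2
      · exact Or.inl h1
      · rcases (ih q).mp h2 with hq | ⟨r, hr, hlr⟩
        · exact Or.inr ⟨q, by simp, hq⟩
        · exact Or.inr ⟨r, by simp [hr], hlr⟩
    · intro h
      rcases h with h1 | ⟨r, hr, hlr⟩
      · exact h1.trans ⟨[], c :: PySem.Chars.join [c] (q :: rest'), by simp⟩
      · have : l <:+: PySem.Chars.join [c] (q :: rest') := by
          apply (ih q).mpr
          rcases List.mem_cons.mp hr with rfl | hr'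
          · exact Or.inl hlr
          · exact Or.inr ⟨r, hr', hlr⟩
        exact this.trans ⟨p ++ [c], [], by simp⟩

theorem nul_not_mem (s : String) (hs : pvDomStr s = true) : ('\x00' : Char) ∉ s.toList := by
  intro hm
  have := (List.all_eq_true.mp hs) _ hm
  simp [pvDomChar] at this

theorem isIn_blob (tm t : String) (rest : List String) (htm : ('\x00' : Char) ∉ tm.toList) :
    PySem.Str.isIn tm (PySem.Str.join "\x00" (t :: rest))
      = (t :: rest).any (fun tok => PySem.Str.isIn tm tok) := by
  rw [Bool.eq_iff_iff, PySem.Str.isIn_iff_infix, PySem.Str.toList_join]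
  have hsep : ("\x00" : String).toList = ['\x00'] := rfl
  rw [hsep, List.map_cons]
  rw [infix_join _ _ htm]
  simp only [List.any_eq_true, List.mem_cons, PySem.Str.isIn_iff_infix]
  constructor
  · rintro (h | ⟨q, hq, hlq⟩)
    · exact ⟨t, Or.inl rfl, h⟩
    · rcases List.mem_map.mp hq with ⟨s, hs, rfl⟩
      exact ⟨s, Or.inr hs, hlq⟩
  · rintro ⟨tok, htok | htok, h⟩
    · exact Or.inl (htok ▸ h)
    · exact Or.inr ⟨tok.toList, List.mem_map_of_mem htok, h⟩

theorem any_swap (xs ys : List String) (f : String → String → Bool) :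
    xs.any (fun x => ys.any (fun y => f x y)) = ys.any (fun y => xs.any (fun x => f x y)) := by
  rw [Bool.eq_iff_iff]
  simp only [List.any_eq_true]
  tauto

-- ===== VERDICT (by name: the statement is the Claim_ definition above) =====
theorem check_central_term_spec : Claim_equal_check_central_term := by
  intro tt_tokens terms hdom
  unfold Spec_check_central_term check_central_term check_central_term_alt
  have hterms : terms.all pvDomStr = true := by
    unfold Dom_check_central_term at hdom
    rw [Bool.and_eq_true] at hdom
    exact hdom.2
  cases tt_tokens with
  | nil => simp
  | cons t rest =>
    rw [if_neg (by simp : ¬ (t :: rest).length ≤ 0), if_neg (by simp : ¬ (t :: rest) = [])]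
    rw [ccTokenLoop_eq, any_swap]
    rw [Bool.eq_iff_iff]
    simp only [List.any_eq_true]
    constructor
    · rintro ⟨tm, hm, h⟩
      refine ⟨tm, hm, ?_⟩
      rw [isIn_blob tm t rest (nul_not_mem tm (List.all_eq_true.mp hterms _ hm))]
      exact List.any_eq_true.mpr h
    · rintro ⟨tm, hm, h⟩
      refine ⟨tm, hm, ?_⟩
      rw [isIn_blob tm t rest (nul_not_mem tm (List.all_eq_true.mp hterms _ hm))] at h
      exact List.any_eq_true.mp h
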